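-- pv_equiv track=rewrite | github.com/nabhpatodi10/Research-AI | backend/graph_modules/visualization_modules/mermaid.py | _find_unbalanced_double_quote_line
-- ===== SOURCE A (Python) =====
-- def _find_unbalanced_double_quote_line(content: str) -> int | None:
--     for index, raw_line in enumerate(str(content or "").splitlines(), start=1):
--         line = raw_line.strip()
--         if not line or line.startswith("%%"):
--             continue
--
--         quote_count = 0
--         escaped = False
--         for char in raw_line:
--             if escaped:
--                 escaped = False
--                 continue
--             if char == "\\":
--                 escaped = True
--                 continue
--             if char == '"':
--                 quote_count += 1
--
--         if quote_count % 2 != 0: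
--             return index
--
--     return None
-- ===== SOURCE B (Python) =====
-- def _find_unbalanced_double_quote_line(content: str) -> int | None:
--     for index, raw_line in enumerate(str(content or "").splitlines(), start=1):
--         line = raw_line.strip()
--         if not line or line.startswith("%%"):
--             continue
--
--         # delete escape pairs up front instead of tracking an escaped flag:
--         # first collapse backslash pairs, then drop escaped quotes
--         effective = raw_line.replace("\\\\", "").replace('\\"', "")
--         if effective.count('"') % 2 != 0:
--             return index
--
--     return None
-- ===== Notes on version B (the rewrite author's own statement) =====
-- stated objective: faster
-- what changed: The inner character-by-character escaped-flag state machine is replaced by deleting escape pairs up front with two C-level str.replace passes (collapse backslash pairs, then drop backslash-quote pairs) and testing the parity of str.count of the quote character on the residue.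
import Mathlib
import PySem

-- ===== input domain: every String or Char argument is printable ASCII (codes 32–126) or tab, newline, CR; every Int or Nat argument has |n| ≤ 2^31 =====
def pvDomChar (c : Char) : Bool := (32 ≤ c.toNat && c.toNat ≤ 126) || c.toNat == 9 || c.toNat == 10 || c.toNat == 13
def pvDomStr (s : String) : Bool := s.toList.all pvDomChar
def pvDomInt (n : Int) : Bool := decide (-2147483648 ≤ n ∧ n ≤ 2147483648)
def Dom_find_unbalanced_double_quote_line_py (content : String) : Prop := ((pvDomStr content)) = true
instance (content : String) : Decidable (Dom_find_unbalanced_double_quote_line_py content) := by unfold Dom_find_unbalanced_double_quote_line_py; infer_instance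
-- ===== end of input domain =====

-- B replaces A's inner escaped-flag state machine by deleting escape pairs with two
-- replace passes and counting quotes on the residue (idiomatic; same O(n) cost).

-- ===== PORT A =====
-- inner loop of A: escaped-flag scan counting unescaped double quotes
def pvA_scan : List Char → Nat → Bool → Nat
  | [], quote_count, _ => quote_count
  | char :: rest, quote_count, escaped =>
    if escaped then pvA_scan rest quote_count false
    else if char = '\\' then pvA_scan rest quote_count true
    else if char = '"' then pvA_scan rest (quote_count + 1) escaped
    else pvA_scan rest quote_count escaped

-- outer loop of A over enumerate(splitlines, start=1)
def pvA_loop : List String → Int → Option Int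
  | [], _ => none
  | raw_line :: rest, index =>
    let line := PySem.Str.strip raw_line
    if PySem.Str.len line = 0 || PySem.Str.startswith line "%%" then pvA_loop rest (index + 1)
    else if pvA_scan raw_line.toList 0 false % 2 ≠ 0 then some index
    else pvA_loop rest (index + 1)

def find_unbalanced_double_quote_line_py (content : String) : Option Int :=
  let s := if content = "" then "" else content   -- str(content or "")
  pvA_loop (PySem.Str.splitlines s) 1

-- ===== PORT B =====
def pvB_loop : List String → Int → Option Int
  | [], _ => none
  | raw_line :: rest, index =>
    let line := PySem.Str.strip raw_line
    if PySem.Str.len line = 0 || PySem.Str.startswith line "%%" then pvB_loop rest (index + 1)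
    else
      let effective := PySem.Str.replace (PySem.Str.replace raw_line "\\\\" "") "\\\"" ""
      if PySem.Str.count effective "\"" % 2 ≠ 0 then some index
      else pvB_loop rest (index + 1)

def find_unbalanced_double_quote_line_py_alt (content : String) : Option Int :=
  let s := if content = "" then "" else content   -- str(content or "")
  pvB_loop (PySem.Str.splitlines s) 1

-- ===== PRECONDITION & SPEC =====
def Spec_find_unbalanced_double_quote_line_py (content : String) (out : Option Int) : Prop := out = find_unbalanced_double_quote_line_py_alt content
instance (content : String) (out : Option Int) : Decidable (Spec_find_unbalanced_double_quote_line_py content out) := by unfold Spec_find_unbalanced_double_quote_line_py; infer_instance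

-- ===== CLAIM (what is proved, stated in full; the proofs are below) =====
def Claim_equal_find_unbalanced_double_quote_line_py : Prop := ∀ (content : String), Dom_find_unbalanced_double_quote_line_py content → Spec_find_unbalanced_double_quote_line_py content (find_unbalanced_double_quote_line_py content)

-- ===== LEMMAS AND PROOFS =====

-- accumulator independence of PySem.Chars.replace.go
theorem pv_replace_go_acc (old new : List Char) : ∀ (fuel : Nat) (l acc : List Char),
    PySem.Chars.replace.go old new fuel l acc = acc.reverse ++ PySem.Chars.replace.go old new fuel l [] := by
  intro fuel
  induction fuel with
  | zero => intro l acc; cases l <;> simp [PySem.Chars.replace.go]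
  | succ n ih =>
    intro l acc
    cases l with
    | nil => simp [PySem.Chars.replace.go]
    | cons c t =>
      simp only [PySem.Chars.replace.go]
      by_cases h : old.isPrefixOf (c :: t) = true
      · simp only [h, if_true]
        rw [ih (List.drop old.length (c :: t)) (new.reverse ++ acc),
            ih (List.drop old.length (c :: t)) (new.reverse ++ [])]
        simp
      · simp only [h, Bool.false_eq_true, if_false]
        rw [ih t (c :: acc), ih t [c]]
        simp

-- fuel irrelevance of PySem.Chars.replace.go above the list length
theorem pv_replace_go_fuel (old new : List Char) (hold : old ≠ []) : ∀ (fuel : Nat) (l acc : List Char),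
    l.length ≤ fuel → PySem.Chars.replace.go old new fuel l acc = PySem.Chars.replace.go old new l.length l acc := by
  intro fuel
  induction fuel using Nat.strong_induction_on with
  | _ fuel ih =>
    intro l acc hl
    match fuel, l with
    | 0, l =>
      have : l = [] := List.eq_nil_of_length_eq_zero (Nat.le_zero.mp hl)
      subst this; rfl
    | n + 1, [] => simp [PySem.Chars.replace.go]
    | n + 1, c :: t =>
      have ht : t.length ≤ n := by simp at hl; omega
      simp only [List.length_cons]
      simp only [PySem.Chars.replace.go]
      have hlen : (List.drop old.length (c :: t)).length ≤ t.length := by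
        have h1 : 1 ≤ old.length := by
          cases old with
          | nil => exact absurd rfl hold
          | cons _ _ => simp
        simp only [List.length_drop, List.length_cons]
        omega
      by_cases h : old.isPrefixOf (c :: t) = true
      · simp only [h, if_true]
        rw [ih n (by omega) _ _ (le_trans hlen ht),
            ih t.length (by omega) _ _ hlen]
      · simp only [h, Bool.false_eq_true, if_false]
        rw [ih n (by omega) t _ ht]

theorem pv_replace_nil (old new : List Char) (hold : old ≠ []) :
    PySem.Chars.replace [] old new = [] := by
  simp [PySem.Chars.replace, hold, PySem.Chars.replace.go]

theorem pv_replace_cons (old new : List Char) (hold : old ≠ []) (c : Char) (t : List Char) :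
    PySem.Chars.replace (c :: t) old new =
      if old.isPrefixOf (c :: t) then
        new ++ PySem.Chars.replace (List.drop old.length (c :: t)) old new
      else c :: PySem.Chars.replace t old new := by
  have hne : old.isEmpty = false := by simp [hold]
  simp only [PySem.Chars.replace, hne, Bool.false_eq_true, if_false, List.length_cons]
  rw [show PySem.Chars.replace.go old new (t.length + 1) (c :: t) [] =
        if old.isPrefixOf (c :: t) = true then
          PySem.Chars.replace.go old new t.length (List.drop old.length (c :: t)) (new.reverse ++ [])
        else PySem.Chars.replace.go old new t.length t ([c]) from by
      simp [PySem.Chars.replace.go]]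
  by_cases h : old.isPrefixOf (c :: t) = true
  · simp only [h, if_true]
    have hlen : (List.drop old.length (c :: t)).length ≤ t.length := by
      have h1 : 1 ≤ old.length := by
        cases old with
        | nil => exact absurd rfl hold
        | cons _ _ => simp
      simp only [List.length_drop, List.length_cons]; omega
    rw [pv_replace_go_fuel old new hold _ _ _ hlen, pv_replace_go_acc]
    simp
  · simp only [h, Bool.false_eq_true, if_false]
    rw [pv_replace_go_acc]
    simp

-- PySem.Chars.count with a single-character needle is List.count
theorem pv_count_go_acc (sub : List Char) : ∀ (fuel : Nat) (l : List Char) (acc : Nat),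
    PySem.Chars.count.go sub fuel l acc = acc + PySem.Chars.count.go sub fuel l 0 := by
  intro fuel
  induction fuel with
  | zero => intro l acc; cases l <;> simp [PySem.Chars.count.go]
  | succ n ih =>
    intro l acc
    cases l with
    | nil => simp [PySem.Chars.count.go]
    | cons c t =>
      simp only [PySem.Chars.count.go]
      by_cases h : sub.isPrefixOf (c :: t) = true
      · simp only [h, if_true]
        rw [ih _ (acc + 1), ih _ (0 + 1)]
        omega
      · simp only [h, Bool.false_eq_true, if_false]
        exact ih t acc

theorem pv_count_single (q : Char) : ∀ (l : List Char),
    PySem.Chars.count l [q] = l.count q := by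
  have go_eq : ∀ (fuel : Nat) (l : List Char), l.length ≤ fuel →
      PySem.Chars.count.go [q] fuel l 0 = l.count q := by
    intro fuel
    induction fuel with
    | zero =>
      intro l hl
      have : l = [] := List.eq_nil_of_length_eq_zero (Nat.le_zero.mp hl)
      subst this; rfl
    | succ n ih =>
      intro l hl
      cases l with
      | nil => simp [PySem.Chars.count.go]
      | cons c t =>
        simp only [PySem.Chars.count.go]
        by_cases h : ([q].isPrefixOf (c :: t)) = true
        · have hqc : q = c := by simpa [List.isPrefixOf] using h
          simp only [h, if_true]
          rw [pv_count_go_acc]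
          simp only [List.length_cons, List.length_nil, Nat.zero_add, List.drop_succ_cons, List.drop_zero]
          rw [ih t (by simp at hl; omega)]
          subst hqc
          simp
          omega
        · have hqc : ¬ (q = c) := by simpa [List.isPrefixOf] using h
          simp only [h, Bool.false_eq_true, if_false]
          rw [ih t (by simp at hl; omega)]
          simp [Ne.symm hqc]
  intro l
  simp only [PySem.Chars.count]
  rw [if_neg (by simp)]
  exact go_eq l.length l (Nat.le_refl _)

-- abbreviations for the two replace passes of B (proof-local helpers)
def pvRep1 (cs : List Char) : List Char := PySem.Chars.replace cs ['\\', '\\'] []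
def pvRep2 (cs : List Char) : List Char := PySem.Chars.replace cs ['\\', '"'] []

-- the per-line core: A's escaped-flag count equals the quote count of B's residue
theorem pv_line_core : ∀ (n : Nat) (cs : List Char), cs.length ≤ n → ∀ (q : Nat),
    pvA_scan cs q false = q + (pvRep2 (pvRep1 cs)).count '"' := by
  intro n
  induction n with
  | zero =>
    intro cs hl q
    have : cs = [] := List.eq_nil_of_length_eq_zero (Nat.le_zero.mp hl)
    subst this
    simp [pvA_scan, pvRep1, pvRep2, pv_replace_nil]
  | succ n ih =>
    intro cs hl q
    cases cs with
    | nil => simp [pvA_scan, pvRep1, pvRep2, pv_replace_nil]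
    | cons c t =>
      by_cases hc : c = '\\'
      · subst hc
        cases t with
        | nil =>
          simp [pvA_scan, pvRep1, pvRep2, pv_replace_cons, pv_replace_nil, List.isPrefixOf]
        | cons c2 r =>
          by_cases hc2 : c2 = '\\'
          · subst hc2
            have hr : pvRep1 ('\\' :: '\\' :: r) = pvRep1 r := by
              simp [pvRep1, pv_replace_cons, List.isPrefixOf]
            have hA : pvA_scan ('\\' :: '\\' :: r) q false = pvA_scan r q false := by
              simp [pvA_scan]
            rw [hA, hr]
            exact ih r (by simp at hl ⊢; omega) q
          · have hr : pvRep1 ('\\' :: c2 :: r) = '\\' :: c2 :: pvRep1 r := by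
              simp only [pvRep1]
              rw [pv_replace_cons _ _ (by simp), if_neg (by simp [List.isPrefixOf, Ne.symm hc2]),
                  pv_replace_cons _ _ (by simp), if_neg (by simp [List.isPrefixOf, Ne.symm hc2])]
            have hA : pvA_scan ('\\' :: c2 :: r) q false = pvA_scan r q false := by
              simp [pvA_scan]
            rw [hA, hr, ih r (by simp at hl ⊢; omega) q]
            by_cases hq2 : c2 = '"'
            · subst hq2
              have : pvRep2 ('\\' :: '"' :: pvRep1 r) = pvRep2 (pvRep1 r) := by
                simp [pvRep2, pv_replace_cons, List.isPrefixOf]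
              rw [this]
            · have : pvRep2 ('\\' :: c2 :: pvRep1 r) = '\\' :: c2 :: pvRep2 (pvRep1 r) := by
                simp only [pvRep2]
                rw [pv_replace_cons _ _ (by simp), if_neg (by simp [List.isPrefixOf, Ne.symm hq2]),
                    pv_replace_cons _ _ (by simp), if_neg (by simp [List.isPrefixOf, Ne.symm hc2])]
              rw [this]
              simp [hq2]
      · have hr : pvRep1 (c :: t) = c :: pvRep1 t := by
          simp only [pvRep1]
          rw [pv_replace_cons _ _ (by simp), if_neg (by simp [List.isPrefixOf, Ne.symm hc])]
        have hr2 : pvRep2 (c :: pvRep1 t) = c :: pvRep2 (pvRep1 t) := by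
          simp only [pvRep2]
          rw [pv_replace_cons _ _ (by simp), if_neg (by simp [List.isPrefixOf, Ne.symm hc])]
        rw [hr, hr2]
        by_cases hq : c = '"'
        · subst hq
          have hA : pvA_scan ('"' :: t) q false = pvA_scan t (q + 1) false := by
            simp [pvA_scan]
          rw [hA, ih t (by simp at hl ⊢; omega) (q + 1)]
          simp
          omega
        · have hA : pvA_scan (c :: t) q false = pvA_scan t q false := by
            simp [pvA_scan, hc, hq]
          rw [hA, ih t (by simp at hl ⊢; omega) q]
          simp [hq]
  
-- the two per-line tests agree
theorem pv_line_eq (raw_line : String) :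
    (pvA_scan raw_line.toList 0 false % 2 ≠ 0) ↔
      (PySem.Str.count (PySem.Str.replace (PySem.Str.replace raw_line "\\\\" "") "\\\"" "") "\"" % 2 ≠ 0) := by
  have h1 : PySem.Str.count (PySem.Str.replace (PySem.Str.replace raw_line "\\\\" "") "\\\"" "") "\"" =
      (pvRep2 (pvRep1 raw_line.toList)).count '"' := by
    rw [PySem.Str.count_eq, PySem.Str.toList_replace, PySem.Str.toList_replace]
    rw [show ("\\\\" : String).toList = ['\\', '\\'] from rfl,
        show ("\\\"" : String).toList = ['\\', '"'] from rfl,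
        show ("" : String).toList = [] from rfl,
        show ("\"" : String).toList = ['"'] from rfl]
    exact pv_count_single '"' _
  have h2 := pv_line_core raw_line.toList.length raw_line.toList (Nat.le_refl _) 0
  rw [h1, h2]
  omega

-- the two outer loops agree
theorem pv_loop_eq : ∀ (ls : List String) (idx : Int), pvA_loop ls idx = pvB_loop ls idx := by
  intro ls
  induction ls with
  | nil => intro idx; rfl
  | cons raw_line rest ih =>
    intro idx
    simp only [pvA_loop, pvB_loop]
    by_cases hskip : (PySem.Str.len (PySem.Str.strip raw_line) = 0 || PySem.Str.startswith (PySem.Str.strip raw_line) "%%") = true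
    · simp only [hskip, if_true]; exact ih (idx + 1)
    · rw [if_neg hskip, if_neg hskip]
      by_cases hA : pvA_scan raw_line.toList 0 false % 2 ≠ 0
      · rw [if_pos hA, if_pos ((pv_line_eq raw_line).mp hA)]
      · rw [if_neg hA, if_neg (fun h => hA ((pv_line_eq raw_line).mpr h))]
        exact ih (idx + 1)

-- ===== VERDICT (by name: the statement is the Claim_ definition above) =====
theorem find_unbalanced_double_quote_line_py_spec : Claim_equal_find_unbalanced_double_quote_line_py := by
  intro content _
  unfold Spec_find_unbalanced_double_quote_line_py
  unfold find_unbalanced_double_quote_line_py find_unbalanced_double_quote_line_py_alt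
  exact pv_loop_eq _ 1
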